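-- pv_equiv track=rewrite | github.com/dinhlam2000/leetcodePractice | Amazon/requestService.py | requests_in_queue
-- ===== SOURCE A (Python) =====
-- from collections import deque
--
-- def requests_in_queue(wait):
--     n = len(wait)
--     queue = deque(wait)  # queue stores the waiting times
--     time = 0
--     result = []
--
--     while queue:
--         # Add the current number of requests in the queue
--         result.append(len(queue))
--
--         queue.popleft()
--
--         # Increment the time
--         time += 1
--
--         # Process the first request in the queue (FIFO)
--
--         # After processing, remove any expired requests (those whose time <= current time)
--         queue = deque([w for w in queue if w > time])
--
--     # Add the final state when the queue becomes empty
--     result.append(0)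
--
--     return result
--
-- wait = [3, 4, 2, 1]
-- ===== SOURCE B (Python) =====
-- def requests_in_queue(wait):
--     n = len(wait)
--     # clamp each waiting time into [1, n+1]: values < 1 never survive a filter,
--     # values > n behave identically to n+1 (time never exceeds n)
--     vals = [1 if w < 1 else (n + 1 if w > n else w) for w in wait]
--     bucket = [0] * (n + 2)          # bucket[v] = live requests with deadline v
--     for v in vals:
--         bucket[v] += 1
--     alive = n
--     result = []
--     q = 0                            # scan pointer: front of the queue
--     t = 0
--     while alive > 0:
--         result.append(alive)
--         # pop the front request (first index not yet popped or expired)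
--         while vals[q] <= t:
--             q += 1
--         bucket[vals[q]] -= 1
--         q += 1
--         alive -= 1
--         # advance time, expiring all requests whose deadline equals the new time
--         t += 1
--         alive -= bucket[t]
--         bucket[t] = 0
--     result.append(0)
--     return result
-- ===== Notes on version B (the rewrite author's own statement) =====
-- stated objective: faster
-- what changed: B replaces A's per-step rebuild-and-rescan of the deque by a single left-to-right scan pointer plus per-deadline counting buckets (deadlines clamped into [1,n+1]), so each element is touched O(1) times: O(n) total instead of A's O(n^2).
import Mathlib
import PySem

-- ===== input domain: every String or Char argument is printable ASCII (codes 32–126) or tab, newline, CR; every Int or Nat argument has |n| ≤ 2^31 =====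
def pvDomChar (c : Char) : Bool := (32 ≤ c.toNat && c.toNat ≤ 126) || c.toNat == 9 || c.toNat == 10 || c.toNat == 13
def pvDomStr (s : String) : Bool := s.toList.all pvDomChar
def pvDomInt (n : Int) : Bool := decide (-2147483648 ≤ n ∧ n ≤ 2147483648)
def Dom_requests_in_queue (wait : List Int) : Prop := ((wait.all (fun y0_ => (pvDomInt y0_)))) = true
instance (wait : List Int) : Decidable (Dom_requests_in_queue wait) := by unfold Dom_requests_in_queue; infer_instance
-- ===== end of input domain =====

-- B replaces A's rebuild-and-rescan of the whole deque at every step by one scan pointer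
-- plus per-deadline counting buckets (O(n) total instead of O(n^2)); objective: faster.

-- ===== PORT A =====
-- the while loop of A: append len(queue), popleft, time += 1, keep w > time
def pvLoopA (queue : List Int) (time : Int) (result : List Int) : List Int :=
  match queue with
  | [] => result ++ [0]
  | _ :: rest =>
      pvLoopA (rest.filter (fun w => decide (w > time + 1))) (time + 1)
        (result ++ [(queue.length : Int)])
termination_by queue.length
decreasing_by
  simp only [List.length_cons]
  calc (List.filter _ rest.attach).unattach.length
      = (List.filter _ rest.attach).length := List.length_unattach ..
    _ ≤ rest.attach.length := List.length_filter_le _ _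
    _ = rest.length := List.length_attach ..
    _ < rest.length + 1 := Nat.lt_succ_self _

def requests_in_queue (wait : List Int) : List Int :=
  pvLoopA wait 0 []

-- ===== PORT B =====
-- clamp of Source B's comprehension: 1 if w < 1 else (n+1 if w > n else w)
def pvClamp (n : Nat) (w : Int) : Int :=
  if w < 1 then 1 else if w > (n : Int) then (n : Int) + 1 else w

-- inner `while vals[q] <= t: q += 1` (the q < n bound is a totality guard only)
def pvSkip (vals : List Int) (t : Int) (q : Nat) : Nat :=
  if h : q < vals.length then
    if vals[q] ≤ t then pvSkip vals t (q + 1) else q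
  else q
termination_by vals.length - q

-- outer `while alive > 0` loop; the bucket list is carried as its lookup function,
-- fuel bounds the iteration count (n+1 suffices; exhaustion is unreachable)
def pvLoopB (vals : List Int) : (Int → Int) → Int → Nat → Int → List Int → Nat → List Int
  | _, _, _, _, result, 0 => result ++ [0]
  | bucket, alive, q, t, result, fuel + 1 =>
      if alive > 0 then
        let result' := result ++ [alive]
        let q' := pvSkip vals t q
        let v := vals.getD q' 0
        let bucket' := Function.update bucket v (bucket v - 1)
        let alive' := alive - 1
        let t' := t + 1
        let alive'' := alive' - bucket' t'
        let bucket'' := Function.update bucket' t' 0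
        pvLoopB vals bucket'' alive'' (q' + 1) t' result' fuel
      else result ++ [0]

def requests_in_queue_alt (wait : List Int) : List Int :=
  let n := wait.length
  let vals := wait.map (pvClamp n)
  let bucket := vals.foldl (fun b v => Function.update b v (b v + 1)) (fun _ => 0)
  pvLoopB vals bucket (n : Int) 0 0 [] (n + 1)

-- ===== PRECONDITION & SPEC =====
def Spec_requests_in_queue (wait : List Int) (out : List Int) : Prop := out = requests_in_queue_alt wait
instance (wait : List Int) (out : List Int) : Decidable (Spec_requests_in_queue wait out) := by unfold Spec_requests_in_queue; infer_instance

-- ===== CLAIM (what is proved, stated in full; the proofs are below) =====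
def Claim_equal_requests_in_queue : Prop := ∀ (wait : List Int), Dom_requests_in_queue wait → Spec_requests_in_queue wait (requests_in_queue wait)

-- ===== LEMMAS AND PROOFS =====

-- the queue A holds at time t once the first q positions have been consumed
def pvQ (wait : List Int) (t : Int) (q : Nat) : List Int :=
  (wait.drop q).filter (fun w => decide (w > t))

-- the bucket contents corresponding to a queue Q (counts of clamped deadlines)
def pvCnt (n : Nat) (Q : List Int) : Int → Int :=
  fun v => ((Q.map (pvClamp n)).count v : Int)

theorem pvClamp_ge_one (n : Nat) (w : Int) : 1 ≤ pvClamp n w := by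
  unfold pvClamp; split_ifs <;> omega

theorem pvClamp_gt_iff (n : Nat) (t w : Int) (ht1 : 1 ≤ t) (htn : t ≤ (n : Int)) :
    (pvClamp n w > t) ↔ (w > t) := by
  unfold pvClamp; split_ifs <;> omega

theorem pvClamp_eq_succ (n : Nat) (t w : Int) (ht1 : 1 ≤ t) (htn : t + 1 ≤ (n : Int))
    (hw : w > t) : (pvClamp n w = t + 1) ↔ ¬ (w > t + 1) := by
  unfold pvClamp; split_ifs <;> omega

theorem pvClamp_eq_one (n : Nat) (w : Int) (hn : 1 ≤ (n : Int)) :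
    (pvClamp n w = 1) ↔ ¬ (w > 1) := by
  unfold pvClamp; split_ifs <;> omega

-- initial bucket: the written-out counting loop computes the count function
theorem foldl_update_count (xs : List Int) (b : Int → Int) (v : Int) :
    (xs.foldl (fun b v => Function.update b v (b v + 1)) b) v = b v + (xs.count v : Int) := by
  induction xs generalizing b with
  | nil => simp
  | cons x xs ih =>
      simp only [List.foldl_cons, ih, List.count_cons]
      by_cases h : x = v <;> simp [Function.update, h] <;> omega

-- popping the head of Q out of Q's bucket leaves the bucket of Q's tail
theorem pvCnt_cons (n : Nat) (x : Int) (xs : List Int) :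
    Function.update (pvCnt n (x :: xs)) (pvClamp n x) ((pvCnt n (x :: xs)) (pvClamp n x) - 1)
      = pvCnt n xs := by
  funext v
  unfold pvCnt
  by_cases h : v = pvClamp n x <;> simp [Function.update, h, List.count_cons] <;> omega

-- (a) expiring deadline s removes exactly bucket[s] elements
theorem filter_len_count (n : Nat) (s : Int) (Q : List Int)
    (h1 : ∀ w ∈ Q, (pvClamp n w = s ↔ ¬ (w > s))) :
    (Q.filter (fun w => decide (w > s))).length + (Q.map (pvClamp n)).count s = Q.length := by
  induction Q with
  | nil => simp
  | cons x xs ih =>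
      have hx := h1 x (by simp)
      have hxs := ih (fun w hw => h1 w (by simp [hw]))
      by_cases h : x > s
      · have hne : pvClamp n x ≠ s := by
          intro hc; exact (hx.mp hc) h
        simp only [List.filter_cons, List.map_cons, List.count_cons, List.length_cons,
          decide_eq_true_eq, if_pos h, hne]
        simp only [decide_eq_false_iff_not] at *
        simp [hne]
        simp only [gt_iff_lt] at hxs
        omega
      · have heq : pvClamp n x = s := hx.mpr h
        simp only [List.filter_cons, List.map_cons, List.count_cons, List.length_cons]
        simp [h, heq]
        simp only [gt_iff_lt] at hxs
        omega

-- (b) after expiring deadline s the bucket is the bucket of the filtered queue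
theorem filter_cnt (n : Nat) (s : Int) (Q : List Int)
    (h1 : ∀ w ∈ Q, (pvClamp n w = s ↔ ¬ (w > s))) :
    Function.update (pvCnt n Q) s 0 = pvCnt n (Q.filter (fun w => decide (w > s))) := by
  funext v
  unfold pvCnt
  induction Q with
  | nil => by_cases h : v = s <;> simp [Function.update, h]
  | cons x xs ih =>
      have hx := h1 x (by simp)
      have hxs := ih (fun w hw => h1 w (by simp [hw]))
      by_cases hv : v = s <;>
        by_cases h : x > s <;>
        simp_all [Function.update, List.filter_cons, List.count_cons] <;> omega

-- the scan pointer never moves backwards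
theorem pvSkip_ge (vals : List Int) (t : Int) :
    ∀ k q, vals.length - q ≤ k → q ≤ pvSkip vals t q := by
  intro k
  induction k with
  | zero =>
      intro q hk
      rw [pvSkip, dif_neg (by omega)]
  | succ k ih =>
      intro q hk
      rw [pvSkip]
      by_cases h : q < vals.length
      · rw [dif_pos h]
        by_cases hle : vals[q] ≤ t
        · rw [if_pos hle]
          exact le_trans (by omega) (ih (q + 1) (by omega))
        · rw [if_neg hle]
      · rw [dif_neg h]

-- the scan pointer finds the head of the current queue
theorem pvSkip_spec (wait : List Int) (t : Int)
    (hiff : ∀ w, (pvClamp wait.length w > t) ↔ (w > t)) :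
    ∀ k q, wait.length - q ≤ k → ∀ x xs, pvQ wait t q = x :: xs →
    ∃ h : pvSkip (wait.map (pvClamp wait.length)) t q < wait.length,
      wait[pvSkip (wait.map (pvClamp wait.length)) t q] = x ∧
      pvQ wait t (pvSkip (wait.map (pvClamp wait.length)) t q + 1) = xs := by
  intro k
  induction k with
  | zero =>
      intro q hk x xs hQ
      exfalso
      have hle : wait.length ≤ q := by omega
      simp [pvQ, List.drop_eq_nil_of_le hle] at hQ
  | succ k ih =>
      intro q hk x xs hQ
      by_cases hlt : q < wait.length
      · have hdrop : wait.drop q = wait[q] :: wait.drop (q + 1) := List.drop_eq_getElem_cons hlt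
        rw [pvSkip]
        have hvl : q < (wait.map (pvClamp wait.length)).length := by simpa using hlt
        rw [dif_pos hvl]
        have hvq : (wait.map (pvClamp wait.length))[q] = pvClamp wait.length wait[q] :=
          List.getElem_map ..
        by_cases hle : (wait.map (pvClamp wait.length))[q] ≤ t
        · have hwle : ¬ (wait[q] > t) := by
            rw [hvq] at hle
            intro hgt
            exact absurd ((hiff _).mpr hgt) (by omega)
          rw [if_pos hle]
          have hQ' : pvQ wait t (q + 1) = x :: xs := by
            unfold pvQ at hQ ⊢
            rw [hdrop, List.filter_cons] at hQ
            simpa [hwle] using hQ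
          exact ih (q + 1) (by omega) x xs hQ'
        · rw [if_neg hle]
          have hwgt : wait[q] > t := by
            rw [hvq] at hle
            exact (hiff _).mp (by omega)
          have hsplit : pvQ wait t q = wait[q] :: pvQ wait t (q + 1) := by
            unfold pvQ
            rw [hdrop, List.filter_cons]
            simp [hwgt]
          rw [hsplit] at hQ
          obtain ⟨h1, h2⟩ := List.cons_eq_cons.mp hQ
          exact ⟨hlt, h1, h2⟩
      · exfalso
        have hle : wait.length ≤ q := by omega
        simp [pvQ, List.drop_eq_nil_of_le hle] at hQ

-- one unfolding of B's outer loop, lets substituted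
theorem pvLoopB_succ (vals : List Int) (bucket : Int → Int) (alive : Int) (q : Nat)
    (t : Int) (result : List Int) (fuel : Nat) (h : alive > 0) :
    pvLoopB vals bucket alive q t result (fuel + 1) =
      pvLoopB vals
        (Function.update
          (Function.update bucket (vals.getD (pvSkip vals t q) 0)
            (bucket (vals.getD (pvSkip vals t q) 0) - 1)) (t + 1) 0)
        (alive - 1 -
          (Function.update bucket (vals.getD (pvSkip vals t q) 0)
            (bucket (vals.getD (pvSkip vals t q) 0) - 1)) (t + 1))
        (pvSkip vals t q + 1) (t + 1) (result ++ [alive]) fuel := by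
  simp [pvLoopB, h]

-- main loop invariant: A's loop and B's loop produce the same output
theorem loop_eq (wait : List Int) : ∀ (fuel : Nat) (t : Int) (q : Nat) (result : List Int),
    1 ≤ t → t ≤ (q : Int) → q ≤ wait.length → (pvQ wait t q).length < fuel →
    pvLoopA (pvQ wait t q) t result =
      pvLoopB (wait.map (pvClamp wait.length)) (pvCnt wait.length (pvQ wait t q))
        ((pvQ wait t q).length : Int) q t result fuel := by
  intro fuel
  induction fuel with
  | zero => intro t q result _ _ _ h; omega
  | succ fuel ih =>
      intro t q result ht1 htq hq hfuel
      rcases hQ : pvQ wait t q with _ | ⟨x, xs⟩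
      · rw [pvLoopA]
        simp [pvLoopB]
      · -- the queue is nonempty, so q < wait.length and t ≤ wait.length - 1
        have hqlt : q < wait.length := by
          by_contra hc
          have hle : wait.length ≤ q := by omega
          simp [pvQ, List.drop_eq_nil_of_le hle] at hQ
        have htn : t ≤ (wait.length : Int) := le_trans htq (by exact_mod_cast Nat.le_of_lt hqlt)
        have hiff : ∀ w, (pvClamp wait.length w > t) ↔ (w > t) := fun w =>
          pvClamp_gt_iff wait.length t w ht1 htn
        obtain ⟨hsk, hskx, hskxs⟩ :=
          pvSkip_spec wait t hiff wait.length q (by omega) x xs hQ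
        set sk := pvSkip (wait.map (pvClamp wait.length)) t q with hskdef
        have hqsk : q ≤ sk := pvSkip_ge (wait.map (pvClamp wait.length)) t
          (wait.map (pvClamp wait.length)).length q (by omega)
        have htn1 : t + 1 ≤ (wait.length : Int) := by
          have : t ≤ (q : Int) := htq
          have : (q : Int) < (wait.length : Int) := by exact_mod_cast hqlt
          omega
        -- members of xs all exceed t
        have hxsmem : ∀ w ∈ xs, w > t := by
          intro w hw
          have : w ∈ pvQ wait t (sk + 1) := by rw [hskxs]; exact hw
          have := List.of_mem_filter this
          simpa using this
        have h1 : ∀ w ∈ xs, (pvClamp wait.length w = t + 1 ↔ ¬ (w > t + 1)) := fun w hw =>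
          pvClamp_eq_succ wait.length t w ht1 htn1 (hxsmem w hw)
        -- the popped value as B reads it
        have hv : (wait.map (pvClamp wait.length)).getD sk 0 = pvClamp wait.length x := by
          have hsk' : sk < (wait.map (pvClamp wait.length)).length := by simpa using hsk
          rw [List.getD_eq_getElem _ _ hsk', List.getElem_map, hskx]
        -- the new queue
        have hnewQ : xs.filter (fun w => decide (w > t + 1)) = pvQ wait (t + 1) (sk + 1) := by
          rw [← hskxs]
          unfold pvQ
          rw [List.filter_filter]
          apply List.filter_congr
          intro w _
          by_cases hw : w > t + 1 <;> simp [hw] <;> omega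
        -- unfold one step of A
        rw [pvLoopA]
        -- unfold one step of B
        rw [pvLoopB_succ _ _ _ _ _ _ _ (by simp)]
        rw [hv, pvCnt_cons]
        have halive : (x :: xs).length - 1 - pvCnt wait.length xs (t + 1) =
            ((xs.filter (fun w => decide (w > t + 1))).length : Int) := by
          have hlc := filter_len_count wait.length (t + 1) xs h1
          unfold pvCnt
          simp only [List.length_cons]
          push_cast
          omega
        have hbucket : Function.update (pvCnt wait.length xs) (t + 1) 0 =
            pvCnt wait.length (xs.filter (fun w => decide (w > t + 1))) :=
          filter_cnt wait.length (t + 1) xs h1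
        rw [halive, hbucket, hnewQ]
        have hlen : (pvQ wait (t + 1) (sk + 1)).length ≤ xs.length := by
          rw [← hnewQ]
          exact List.length_filter_le _ _
        exact ih (t + 1) (sk + 1) (result ++ [((x :: xs).length : Int)])
          (by omega) (by push_cast; omega) (by omega) (by rw [hQ] at hfuel; simp only [List.length_cons] at hfuel; omega)

-- ===== VERDICT (by name: the statement is the Claim_ definition above) =====
theorem requests_in_queue_spec : Claim_equal_requests_in_queue := by
  intro wait _
  unfold Spec_requests_in_queue requests_in_queue requests_in_queue_alt
  rcases wait with _ | ⟨w, ws⟩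
  · rw [pvLoopA]
    simp [pvLoopB]
  · show pvLoopA (w :: ws) 0 [] =
      pvLoopB ((w :: ws).map (pvClamp (w :: ws).length))
        (((w :: ws).map (pvClamp (w :: ws).length)).foldl
          (fun b v => Function.update b v (b v + 1)) (fun _ => 0))
        (((w :: ws).length : Nat) : Int) 0 0 [] ((w :: ws).length + 1)
    have hb0 : (((w :: ws).map (pvClamp (w :: ws).length)).foldl
        (fun b v => Function.update b v (b v + 1)) (fun _ => 0)) =
        pvCnt (w :: ws).length (w :: ws) := by
      funext v
      rw [foldl_update_count]
      unfold pvCnt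
      simp
    have hskip0 : pvSkip ((w :: ws).map (pvClamp (w :: ws).length)) 0 0 = 0 := by
      rw [pvSkip]
      rw [dif_pos (by simp)]
      rw [if_neg (by
        simp only [List.getElem_map]
        have := pvClamp_ge_one (w :: ws).length ((w :: ws)[0])
        omega)]
    have hv : ((w :: ws).map (pvClamp (w :: ws).length)).getD 0 0 =
        pvClamp (w :: ws).length w := by
      rw [List.getD_eq_getElem _ _ (by simp), List.getElem_map]
      simp
    have hn1 : (1 : Int) ≤ ((w :: ws).length : Int) := by
      simp only [List.length_cons]
      push_cast
      omega
    have h1 : ∀ u ∈ ws, (pvClamp (w :: ws).length u = 0 + 1 ↔ ¬ (u > 0 + 1)) := by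
      intro u _
      simpa using pvClamp_eq_one (w :: ws).length u hn1
    rw [pvLoopA]
    rw [show (w :: ws).length + 1 = ((w :: ws).length : Nat) + 1 from rfl]
    rw [pvLoopB_succ _ _ _ _ _ _ _ (by simp)]
    rw [hskip0, hv, hb0, pvCnt_cons]
    have halive : (((w :: ws).length : Nat) : Int) - 1 - pvCnt (w :: ws).length ws (0 + 1) =
        ((ws.filter (fun u => decide (u > 0 + 1))).length : Int) := by
      have hlc := filter_len_count (w :: ws).length (0 + 1) ws h1
      have hl : (w :: ws).length = ws.length + 1 := rfl
      unfold pvCnt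
      simp only [zero_add] at hlc ⊢
      push_cast
      omega
    have hbucket : Function.update (pvCnt (w :: ws).length ws) (0 + 1) 0 =
        pvCnt (w :: ws).length (ws.filter (fun u => decide (u > 0 + 1))) :=
      filter_cnt (w :: ws).length (0 + 1) ws h1
    rw [halive, hbucket]
    have hnewQ : ws.filter (fun u => decide (u > 0 + 1)) = pvQ (w :: ws) (0 + 1) 1 := by
      unfold pvQ
      simp
    rw [hnewQ]
    have := loop_eq (w :: ws) (w :: ws).length (0 + 1) 1 ([] ++ [((w :: ws).length : Int)])
      (by omega) (by omega) (by simp) (by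
        have : (pvQ (w :: ws) (0 + 1) 1).length ≤ ws.length := by
          rw [← hnewQ]
          exact List.length_filter_le _ _
        simp only [List.length_cons]
        omega)
    simpa using this
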